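-- pv_equiv track=rewrite | github.com/iiibs/LADDER | Ladder.py | int_to_board
-- ===== SOURCE A (Python) =====
-- n_states=3 # because there are 3 states of a square: 1. empty, 2. X, 3. O
--
-- n_rows=1
--
-- n_cols=4
--
-- def int_to_board(int_value):
--  """
--  Convert an integer representation to a 2D game board.
--  """
--  int_value-=1
--  board = [['-' for _ in range(n_cols)] for _ in range(n_rows)]
--  for i in range(n_rows-1, -1, -1):
--   for j in range(n_cols-1, -1, -1):
--    remainder = int_value % n_states
--    if remainder == 1:
--     board[i][j] = 'X'
--    elif remainder == 2:
--     board[i][j] = 'O'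
--    int_value //= n_states  # Shift right by one digit
--  return board
-- ===== SOURCE B (Python) =====
-- n_states = 3
-- n_rows = 1
-- n_cols = 4
--
-- def int_to_board(int_value):
--     """
--     Convert an integer representation to a 2D game board.
--     Each cell is computed independently in closed form: cell (i, j) holds the
--     base-3 digit of (int_value - 1) at positional weight n_states**(total-1-pos),
--     looked up in a symbol table. No sequential divmod state is threaded.
--     """
--     v = int_value - 1
--     symbols = ['-', 'X', 'O']
--     total = n_rows * n_cols
--     return [[symbols[(v // n_states ** (total - 1 - (i * n_cols + j))) % n_states]
--              for j in range(n_cols)]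
--             for i in range(n_rows)]
-- ===== Notes on version B (the rewrite author's own statement) =====
-- stated objective: alternative
-- what changed: B computes each board cell independently in closed form -- symbols[(v // n_states**(total-1-pos)) % n_states] inside a comprehension with a symbol table -- instead of A's nested reverse index loops that mutate a prefilled board while sequentially shifting a divmod state.
import Mathlib
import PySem

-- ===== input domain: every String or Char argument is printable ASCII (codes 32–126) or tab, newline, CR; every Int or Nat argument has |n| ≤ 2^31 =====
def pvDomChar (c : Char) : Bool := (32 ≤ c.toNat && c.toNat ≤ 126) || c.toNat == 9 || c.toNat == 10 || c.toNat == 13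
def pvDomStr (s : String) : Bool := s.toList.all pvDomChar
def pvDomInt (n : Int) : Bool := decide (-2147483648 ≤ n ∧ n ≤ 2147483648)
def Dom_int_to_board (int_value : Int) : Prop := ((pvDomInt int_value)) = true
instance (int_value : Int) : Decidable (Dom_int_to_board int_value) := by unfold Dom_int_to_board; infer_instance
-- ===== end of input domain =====

-- B computes every cell independently in closed form ((v // 3^k) % 3 with a symbol
-- table) instead of A's nested loops threading a sequentially shifted divmod state;
-- objective: alternative decomposition, same cost.

-- ===== PORT A =====
-- literal port of A: prefilled board, nested reversed index loops mutating board[i][j],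
-- state = (int_value, board); board[i][j] = c is ported as List.set (i, j nonnegative from range)
def int_to_board (int_value : Int) : List (List String) :=
  let v0 := int_value - 1
  let board0 : List (List String) :=
    (PySem.List.pyRange 0 1 1).map (fun _ => (PySem.List.pyRange 0 4 1).map (fun _ => "-"))
  let res := (PySem.List.pyRange (1 - 1) (-1) (-1)).foldl
    (fun (st : Int × List (List String)) (i : Int) =>
      (PySem.List.pyRange (4 - 1) (-1) (-1)).foldl
        (fun (st : Int × List (List String)) (j : Int) =>
          let v := st.1
          let board := st.2
          let remainder := PySem.Int.mod v 3
          let board :=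
            if remainder = 1 then
              board.set i.toNat ((board.getD i.toNat []).set j.toNat "X")
            else if remainder = 2 then
              board.set i.toNat ((board.getD i.toNat []).set j.toNat "O")
            else board
          (PySem.Int.floordiv v 3, board)) st) (v0, board0)
  res.2

-- ===== PORT B =====
-- closed-form per-cell digit: symbols[(v // 3 ** (total-1-pos)) % 3]
-- (pyGetD's "" default is unreachable: the index is a mod-3 result in [0, 3))
def int_to_board_alt (int_value : Int) : List (List String) :=
  let v := int_value - 1
  let symbols : List String := ["-", "X", "O"]
  (PySem.List.pyRange 0 1 1).map (fun i =>
    (PySem.List.pyRange 0 4 1).map (fun j =>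
      PySem.List.pyGetD symbols
        (PySem.Int.mod (PySem.Int.floordiv v ((3 : Int) ^ ((1 * 4 - 1 - (i * 4 + j) : Int)).toNat)) 3) ""))

-- ===== PRECONDITION & SPEC =====
def Spec_int_to_board (int_value : Int) (out : List (List String)) : Prop := out = int_to_board_alt int_value
instance (int_value : Int) (out : List (List String)) : Decidable (Spec_int_to_board int_value out) := by unfold Spec_int_to_board; infer_instance

-- ===== CLAIM =====
def Claim_equal_int_to_board : Prop := ∀ (int_value : Int), Dom_int_to_board int_value → Spec_int_to_board int_value (int_to_board int_value)

-- ===== LEMMAS AND PROOFS =====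

-- ===== VERDICT =====
set_option maxHeartbeats 2000000 in
theorem int_to_board_spec : Claim_equal_int_to_board := by
  intro v _
  unfold Spec_int_to_board int_to_board int_to_board_alt
  simp [PySem.List.pyRange, PySem.List.pyGetD,
        PySem.Int.floordiv_eq_ediv_of_pos, PySem.Int.mod_eq_emod_of_pos]
  simp only [List.range_succ, List.range_zero, List.map_cons, List.map_nil,
    List.nil_append, List.cons_append, List.foldl_cons, List.foldl_nil, Function.comp]
  have h9 : (v - 1) / 3 / 3 = (v - 1) / 9 := by omega
  have h27 : (v - 1) / 9 / 3 = (v - 1) / 27 := by omega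
  rw [h9, h27]
  have e0 : (v - 1) % 3 = 0 ∨ (v - 1) % 3 = 1 ∨ (v - 1) % 3 = 2 := by omega
  have e1 : (v - 1) / 3 % 3 = 0 ∨ (v - 1) / 3 % 3 = 1 ∨ (v - 1) / 3 % 3 = 2 := by omega
  have e2 : (v - 1) / 9 % 3 = 0 ∨ (v - 1) / 9 % 3 = 1 ∨ (v - 1) / 9 % 3 = 2 := by omega
  have e3 : (v - 1) / 27 % 3 = 0 ∨ (v - 1) / 27 % 3 = 1 ∨ (v - 1) / 27 % 3 = 2 := by omega
  rcases e0 with h0 | h0 | h0 <;> rcases e1 with h1 | h1 | h1 <;>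
    rcases e2 with h2 | h2 | h2 <;> rcases e3 with h3 | h3 | h3 <;>
    simp [h0, h1, h2, h3, PySem.List.pyGet?, PySem.List.pyIdx?]
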